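-- pv_equiv track=rewrite | github.com/mimino01/OSSW6 | connect.py | is_vertical_win
-- ===== SOURCE A (Python) =====
-- def is_vertical_win(grid, player, last_played_cell, win_score):                             #수직 승리조건 확인
--     score = 0
--     for row in range(0, len(grid)):                                                         #그리드 내의 row에서
--       if grid[row][last_played_cell[1]] == player:                                          #마지막에 놓인 셀과 같은 색상의 연속된 셀이
--         score += 1                                                                          #있다면 score 1 증가
--         if score >= win_score:                                                              #승리 점수 만족시
--           return True                                                                       #True 반환
--       else:                                                                                 #아니라면
--         score = 0
--     return False                                                                            #False를 반환한다.
-- ===== SOURCE B (Python) =====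
-- def is_vertical_win(grid, player, last_played_cell, win_score):
--     col = [row[last_played_cell[1]] for row in grid]
--     need = max(win_score, 1)  # a winning run must contain at least one cell
--     return any(all(v == player for v in col[i:i + need])
--                for i in range(len(col) - need + 1))
-- ===== Notes on version B (the rewrite author's own statement) =====
-- stated objective: alternative
-- what changed: B extracts the column once and tests win by an exists-a-window sliding-window check over explicit slices (any window of length max(win_score,1) all equal to the player), replacing A's running-counter-with-reset loop.
-- outside the precondition, e.g. on is_vertical_win([[1], []], 1, (0, 0), 1): A returns True, B raises IndexError
import Mathlib
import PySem

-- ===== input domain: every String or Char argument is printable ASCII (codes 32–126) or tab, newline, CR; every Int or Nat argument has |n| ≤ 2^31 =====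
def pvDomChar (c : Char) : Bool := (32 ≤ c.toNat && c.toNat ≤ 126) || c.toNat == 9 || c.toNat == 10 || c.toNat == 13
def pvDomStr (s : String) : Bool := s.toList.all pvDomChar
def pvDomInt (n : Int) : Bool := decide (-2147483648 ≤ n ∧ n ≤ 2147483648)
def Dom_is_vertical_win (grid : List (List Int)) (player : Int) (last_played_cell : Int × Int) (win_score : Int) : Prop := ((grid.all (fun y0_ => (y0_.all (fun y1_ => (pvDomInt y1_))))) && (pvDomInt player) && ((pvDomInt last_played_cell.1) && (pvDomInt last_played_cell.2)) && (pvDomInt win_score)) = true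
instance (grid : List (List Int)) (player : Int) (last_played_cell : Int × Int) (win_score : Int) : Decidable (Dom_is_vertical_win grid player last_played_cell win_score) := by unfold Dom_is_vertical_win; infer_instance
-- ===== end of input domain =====

-- B replaces A's running-counter-with-reset scan by a sliding-window check (any window of
-- length max(win_score,1) in the extracted column all equal to the player): alternative algorithm.


-- ===== PORT A =====
-- A's loop: for row in range(len(grid)): look at grid[row][c], bump/reset score, early-return.
-- The recursion walks the rows in the same order with the same score state; 'none' (IndexError)
-- is unreachable under Pre_.
def isvwA_loop (player c win_score : Int) : List (List Int) → Int → Bool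
  | [], _ => false
  | r :: rs, score =>
    match PySem.List.pyGet? r c with
    | none => false   -- IndexError in Python; excluded by Pre_
    | some v =>
      if v == player then
        (if score + 1 ≥ win_score then true else isvwA_loop player c win_score rs (score + 1))
      else isvwA_loop player c win_score rs 0

def is_vertical_win (grid : List (List Int)) (player : Int) (last_played_cell : Int × Int) (win_score : Int) : Bool :=
  isvwA_loop player last_played_cell.2 win_score grid 0

-- ===== PORT B =====
-- col = [row[c] for row in grid]; need = max(win_score, 1);
-- any(all(v == player for v in col[i:i+need]) for i in range(len(col) - need + 1))
def is_vertical_win_alt (grid : List (List Int)) (player : Int) (last_played_cell : Int × Int) (win_score : Int) : Bool :=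
  let col : List Int := grid.map (fun r => (PySem.List.pyGet? r last_played_cell.2).getD 0)  -- total under Pre_
  let need : Int := max win_score 1
  (PySem.List.pyRange 0 ((col.length : Int) - need + 1) 1).any
    (fun i => (PySem.List.slice col (some i) (some (i + need))).all (fun v => v == player))

-- ===== PRECONDITION & SPEC =====
-- Pre_ excludes column indices that are out of range for some row (Python raises IndexError there
-- unless A early-returns True first; B, which extracts the whole column first, raises on all of them).
def Pre_is_vertical_win (grid : List (List Int)) (player : Int) (last_played_cell : Int × Int) (win_score : Int) : Prop :=
  ∀ r ∈ grid, PySem.Raise.InRange r.length last_played_cell.2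
instance (grid : List (List Int)) (player : Int) (last_played_cell : Int × Int) (win_score : Int) : Decidable (Pre_is_vertical_win grid player last_played_cell win_score) := by unfold Pre_is_vertical_win; infer_instance

def pvWitness_is_vertical_win : List (List Int) × Int × (Int × Int) × Int := ([[1, 0], [1, 0], [2, 0]], 1, (2, 0), 2)

def Spec_is_vertical_win (grid : List (List Int)) (player : Int) (last_played_cell : Int × Int) (win_score : Int) (out : Bool) : Prop := out = is_vertical_win_alt grid player last_played_cell win_score
instance (grid : List (List Int)) (player : Int) (last_played_cell : Int × Int) (win_score : Int) (out : Bool) : Decidable (Spec_is_vertical_win grid player last_played_cell win_score out) := by unfold Spec_is_vertical_win; infer_instance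

-- ===== CLAIM (what is proved, stated in full; the proofs are below) =====
def Claim_equal_is_vertical_win : Prop := ∀ (grid : List (List Int)) (player : Int) (last_played_cell : Int × Int) (win_score : Int), Dom_is_vertical_win grid player last_played_cell win_score → Pre_is_vertical_win grid player last_played_cell win_score → Spec_is_vertical_win grid player last_played_cell win_score (is_vertical_win grid player last_played_cell win_score)

-- ===== LEMMAS AND PROOFS =====

-- The window length B uses, as a Nat.
def needN (w : Int) : Nat := (max w 1).toNat

lemma needN_pos (w : Int) : 1 ≤ needN w := by
  unfold needN; omega

lemma needN_cast (w : Int) : (needN w : Int) = max w 1 := by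
  unfold needN; omega

-- A's loop on the already-extracted column.
def fA (player w : Int) : List Int → Int → Bool
  | [], _ => false
  | v :: vs, s =>
    if v == player then
      (if s + 1 ≥ w then true else fA player w vs (s + 1))
    else fA player w vs 0

-- Under Pre_, A's loop over the grid is the pure loop over the extracted column.
lemma isvwA_loop_eq_fA (player c w : Int) (rs : List (List Int)) (s : Int)
    (h : ∀ r ∈ rs, PySem.Raise.InRange r.length c) :
    isvwA_loop player c w rs s = fA player w (rs.map (fun r => (PySem.List.pyGet? r c).getD 0)) s := by
  induction rs generalizing s with
  | nil => rfl
  | cons r rs ih =>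
    have hr : PySem.Raise.InRange r.length c := h r (by simp)
    obtain ⟨v, hv⟩ : ∃ v, PySem.List.pyGet? r c = some v := by
      rcases hx : PySem.List.pyGet? r c with _ | v
      · exact absurd ((PySem.List.pyGet?_eq_none_iff r c).mp hx) (by simpa using hr)
      · exact ⟨v, rfl⟩
    have h' : ∀ r ∈ rs, PySem.Raise.InRange r.length c := fun r hmem => h r (by simp [hmem])
    have hmap : (r :: rs).map (fun r => (PySem.List.pyGet? r c).getD 0)
        = v :: rs.map (fun r => (PySem.List.pyGet? r c).getD 0) := by simp [hv]
    rw [hmap]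
    simp only [isvwA_loop, fA, hv]
    split_ifs <;> first | rfl | exact ih _ h'

-- "some window of length needN w is all player" (the D2 of the proof).
def hasWin (player w : Int) (col : List Int) : Prop :=
  ∃ i : Nat, i + needN w ≤ col.length ∧ ((col.drop i).take (needN w)).all (fun v => v == player) = true

lemma all_take_le {p : Int → Bool} {l : List Int} {m k : Nat} (h : m ≤ k)
    (ha : (l.take k).all p = true) : (l.take m).all p = true := by
  simp only [List.all_eq_true] at *
  intro x hx
  have : x ∈ (l.take k).take m := by
    rwa [List.take_take, Nat.min_eq_left h]
  exact ha x (List.mem_of_mem_take this)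

-- the "active run reaching win_score from a clean start" disjunct at s = 0 is itself a window
lemma d1_to_d2 (player w : Int) (col : List Int)
    (h : ∃ k : Nat, 1 ≤ k ∧ w ≤ (k : Int) ∧ k ≤ col.length ∧ (col.take k).all (fun v => v == player) = true) :
    hasWin player w col := by
  obtain ⟨k, hk1, hkw, hkl, hall⟩ := h
  have hneed : needN w ≤ k := by have := needN_cast w; omega
  exact ⟨0, by simpa using le_trans hneed hkl, by
    simpa using all_take_le hneed hall⟩

-- main invariant for A's loop
lemma fA_iff (player w : Int) : ∀ (col : List Int) (s : Int), 0 ≤ s →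
    (fA player w col s = true ↔
      (∃ k : Nat, 1 ≤ k ∧ w ≤ s + (k : Int) ∧ k ≤ col.length ∧ (col.take k).all (fun v => v == player) = true) ∨
      hasWin player w col) := by
  intro col
  induction col with
  | nil =>
    intro s _
    simp only [fA, hasWin]
    constructor
    · intro h; cases h
    · rintro (⟨k, h1, _, h3, _⟩ | ⟨i, h1, _⟩)
      · simp at h3; omega
      · have := needN_pos w; simp at h1; omega
  | cons v vs ih =>
    intro s hs
    by_cases hv : v = player
    · subst hv
      simp only [fA, BEq.rfl, if_true]
      have hstep : (∃ k : Nat, 1 ≤ k ∧ w ≤ s + (k : Int) ∧ k ≤ (v :: vs).length ∧ ((v :: vs).take k).all (fun x => x == v) = true) ∨ hasWin v w (v :: vs) ↔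
          (w ≤ s + 1 ∨ ((∃ k : Nat, 1 ≤ k ∧ w ≤ (s + 1) + (k : Int) ∧ k ≤ vs.length ∧ (vs.take k).all (fun x => x == v) = true) ∨ hasWin v w vs)) := by
        constructor
        · rintro (⟨k, hk1, hkw, hkl, hall⟩ | ⟨i, hi, hall⟩)
          · rcases Nat.exists_eq_add_of_le hk1 with ⟨k', rfl⟩
            rcases Nat.eq_zero_or_pos k' with rfl | hk'
            · left; push_cast at hkw; omega
            · right; left
              refine ⟨k', hk', by push_cast at hkw ⊢; omega, by simp at hkl; omega, ?_⟩
              have : ((v :: vs).take (1 + k')).all (fun x => x == v) = true := hall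
              rw [Nat.add_comm] at this
              simpa using this
          · rcases i with _ | j
            · -- window at 0 in v :: vs
              have hne := needN_pos w
              rcases Nat.exists_eq_add_of_le hne with ⟨m, hm⟩
              rcases Nat.eq_zero_or_pos m with rfl | hmpos
              · left
                have : (needN w : Int) = max w 1 := needN_cast w
                omega
              · right; left
                refine ⟨m, hmpos, ?_, by simp at hi; omega, ?_⟩
                · have : (needN w : Int) = max w 1 := needN_cast w
                  omega
                · have hall' : ((v :: vs).take (needN w)).all (fun x => x == v) = true := by simpa using hall
                  rw [hm, Nat.add_comm] at hall'
                  simpa using hall'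
            · right; right
              exact ⟨j, by simp at hi; omega, by simpa using hall⟩
        · rintro (hw | ⟨k', hk1, hkw, hkl, hall⟩ | ⟨i, hi, hall⟩)
          · left; exact ⟨1, le_refl _, by push_cast; omega, by simp, by simp⟩
          · left
            refine ⟨k' + 1, by omega, by push_cast at hkw ⊢; omega, by simp; omega, ?_⟩
            simpa using hall
          · right
            exact ⟨i + 1, by simp at hi ⊢; omega, by simpa using hall⟩
      by_cases hw : s + 1 ≥ w
      · rw [if_pos hw]
        simp only [true_iff]
        exact hstep.mpr (Or.inl (by omega))
      · rw [if_neg hw]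
        rw [ih (s + 1) (by omega)]
        rw [hstep]
        constructor
        · intro h; exact Or.inr h
        · rintro (h | h)
          · omega
          · exact h
    · have hvb : (v == player) = false := by simp [hv]
      have hred : fA player w (v :: vs) s = fA player w vs 0 := by simp [fA, hvb]
      rw [hred, ih 0 (by omega)]
      constructor
      · rintro (⟨k, hk1, hkw, hkl, hall⟩ | h)
        · right
          obtain ⟨i, h1, h2⟩ := d1_to_d2 player w vs ⟨k, hk1, by omega, hkl, hall⟩
          exact ⟨i + 1, by simp at h1 ⊢; omega, by simpa using h2⟩
        · right
          obtain ⟨i, hi, hall⟩ := h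
          exact ⟨i + 1, by simp at hi ⊢; omega, by simpa using hall⟩
      · rintro (⟨k, hk1, _, hkl, hall⟩ | ⟨i, hi, hall⟩)
        · exfalso
          rcases Nat.exists_eq_add_of_le hk1 with ⟨k', rfl⟩
          rw [Nat.add_comm] at hall
          simp [hv] at hall
        · rcases i with _ | j
          · exfalso
            have hne := needN_pos w
            rcases Nat.exists_eq_add_of_le hne with ⟨m, hm⟩
            rw [hm, Nat.add_comm] at hall
            simp [hv] at hall
          · right
            exact ⟨j, by simp at hi; omega, by simpa using hall⟩

-- B's port computes exactly hasWin
lemma alt_iff_hasWin (grid : List (List Int)) (player : Int) (lpc : Int × Int) (w : Int) :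
    (is_vertical_win_alt grid player lpc w = true ↔
      hasWin player w (grid.map (fun r => (PySem.List.pyGet? r lpc.2).getD 0))) := by
  unfold is_vertical_win_alt
  set col := grid.map (fun r => (PySem.List.pyGet? r lpc.2).getD 0) with hcol
  simp only [List.any_eq_true, PySem.List.mem_pyRange_one]
  constructor
  · rintro ⟨i, ⟨hi0, hi1⟩, hall⟩
    refine ⟨i.toNat, ?_, ?_⟩
    · have := needN_cast w; omega
    · rw [PySem.List.slice_toNat col (by omega) (by have := needN_cast w; omega)] at hall
      have heq : (i + max w 1).toNat - i.toNat = needN w := by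
        have := needN_cast w; omega
      rwa [heq] at hall
  · rintro ⟨i, hi, hall⟩
    refine ⟨(i : Int), ⟨by omega, by have := needN_cast w; omega⟩, ?_⟩
    rw [PySem.List.slice_toNat col (by omega) (by have := needN_cast w; omega)]
    have heq : ((i : Int) + max w 1).toNat - ((i : Int)).toNat = needN w := by
      have := needN_cast w; omega
    rwa [heq]

-- ===== VERDICT (by name: the statement is the Claim_ definition above) =====
theorem is_vertical_win_spec : Claim_equal_is_vertical_win := by
  intro grid player lpc w _ hpre
  unfold Spec_is_vertical_win
  set col := grid.map (fun r => (PySem.List.pyGet? r lpc.2).getD 0) with hcol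
  have hA : is_vertical_win grid player lpc w = fA player w col 0 :=
    isvwA_loop_eq_fA player lpc.2 w grid 0 hpre
  have hiff : is_vertical_win grid player lpc w = true ↔ is_vertical_win_alt grid player lpc w = true := by
    rw [hA, alt_iff_hasWin, fA_iff player w col 0 (by omega)]
    constructor
    · rintro (h | h)
      · exact d1_to_d2 player w col (by simpa using h)
      · exact h
    · exact Or.inr
  rcases hb : is_vertical_win_alt grid player lpc w with _ | _ <;>
    rcases ha : is_vertical_win grid player lpc w with _ | _ <;>
      simp_all
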